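-- pv_equiv track=rewrite | github.com/ajax88/chessai | board/chessboard.py | generate_inbetween_squares
-- ===== SOURCE A (Python) =====
-- def generate_inbetween_squares(start_row, start_col, end_row, end_col):
--     # Ensure that boundary squares are unique
--     if start_row == end_row and start_col == end_col:
--         raise ValueError("generator must take unique positions.")
--
--     # Case 1: Diagonal move
--     r_dir, c_dir = 0, 0
--     if abs(end_row - start_row) == abs(end_col - start_col):
--         abs_distance = abs(end_row - start_row)
--         # Determine if column and row values should increase or decrease to get
--         # diagonal direction
--         r_dir = -1 if (start_row - end_row) > 0 else 1
--         c_dir = -1 if (start_col - end_col) > 0 else 1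
--
--     # Case 2: Horizontal move
--     elif start_row == end_row:
--         abs_distance = abs(start_col - end_col)
--         c_dir = -1 if (start_col - end_col) > 0 else 1
--
--     # Case 3: Vertical move
--     elif start_col == end_col:
--         abs_distance = abs(start_row - end_row)
--         r_dir = -1 if (start_row - end_row) > 0 else 1
--
--     else:
--         raise ValueError("Inbetween generator must take straight path.")
--
--     next_row, next_col = start_row, start_col
--     for _ in range(abs_distance):
--         next_row += r_dir
--         next_col += c_dir
--         yield (next_row, next_col)
-- ===== SOURCE B (Python) =====
-- def generate_inbetween_squares(start_row, start_col, end_row, end_col):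
--     if start_row == end_row and start_col == end_col:
--         raise ValueError("generator must take unique positions.")
--     dr, dc = end_row - start_row, end_col - start_col
--     if dr and dc and abs(dr) != abs(dc):
--         raise ValueError("Inbetween generator must take straight path.")
--     # Walk BACKWARD from the end square toward the start, one king-step at a
--     # time, until the start square is reached; no distance is ever computed.
--     out = []
--     r, c = end_row, end_col
--     while (r, c) != (start_row, start_col):
--         out.append((r, c))
--         r -= (r > start_row) - (r < start_row)
--         c -= (c > start_col) - (c < start_col)
--     yield from reversed(out)
-- ===== Notes on version B (the rewrite author's own statement) =====
-- stated objective: alternative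
-- what changed: B walks backward from the end square toward the start until it reaches it (never computing abs_distance or a per-case direction table), collecting squares and yielding them reversed, instead of A's forward loop counted by a precomputed distance with a mutating (next_row, next_col) accumulator.
import Mathlib
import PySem

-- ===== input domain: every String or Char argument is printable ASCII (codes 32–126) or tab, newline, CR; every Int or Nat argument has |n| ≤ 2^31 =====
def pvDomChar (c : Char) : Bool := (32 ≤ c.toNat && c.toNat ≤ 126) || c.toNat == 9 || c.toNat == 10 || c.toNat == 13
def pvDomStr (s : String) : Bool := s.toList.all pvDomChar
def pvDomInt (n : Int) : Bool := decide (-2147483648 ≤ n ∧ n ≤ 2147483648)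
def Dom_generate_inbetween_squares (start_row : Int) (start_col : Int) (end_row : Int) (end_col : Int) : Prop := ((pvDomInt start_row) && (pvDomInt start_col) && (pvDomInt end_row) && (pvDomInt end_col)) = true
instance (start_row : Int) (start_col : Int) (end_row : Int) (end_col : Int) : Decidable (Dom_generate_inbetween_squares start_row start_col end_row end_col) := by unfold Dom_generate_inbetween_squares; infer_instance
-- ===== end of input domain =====

-- B walks backward from the end square toward the start (no distance or direction
-- table is computed), collecting squares and yielding them reversed, instead of A's
-- forward loop counted by a precomputed abs_distance (alternative; same cost).
-- Both Pythons are generators; the ports give the list of yielded squares.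

-- ===== PORT A =====
-- the 'for _ in range(abs_distance)' loop mutating (next_row, next_col)
def pvALoop : Nat → Int → Int → Int → Int → List (Int × Int)
  | 0, _, _, _, _ => []
  | n+1, r, c, rd, cd => (r + rd, c + cd) :: pvALoop n (r + rd) (c + cd) rd cd

def generate_inbetween_squares (start_row : Int) (start_col : Int) (end_row : Int) (end_col : Int) : List (Int × Int) :=
  if start_row = end_row ∧ start_col = end_col then []  -- raise ValueError (outside Pre_)
  else if (end_row - start_row).natAbs = (end_col - start_col).natAbs then
    -- Case 1: diagonal
    let abs_distance := (end_row - start_row).natAbs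
    let r_dir : Int := if start_row - end_row > 0 then -1 else 1
    let c_dir : Int := if start_col - end_col > 0 then -1 else 1
    pvALoop abs_distance start_row start_col r_dir c_dir
  else if start_row = end_row then
    -- Case 2: horizontal (r_dir stays 0)
    let abs_distance := (start_col - end_col).natAbs
    let c_dir : Int := if start_col - end_col > 0 then -1 else 1
    pvALoop abs_distance start_row start_col 0 c_dir
  else if start_col = end_col then
    -- Case 3: vertical (c_dir stays 0)
    let abs_distance := (start_row - end_row).natAbs
    let r_dir : Int := if start_row - end_row > 0 then -1 else 1
    pvALoop abs_distance start_row start_col r_dir 0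
  else []  -- raise ValueError (outside Pre_)

-- ===== PORT B =====
-- the unit step (r > t) - (r < t) toward the target t
def pvStep (t x : Int) : Int := (if x > t then (1 : Int) else 0) - (if x < t then (1 : Int) else 0)

-- the 'while (r, c) != (start_row, start_col)' backward walk collecting 'out';
-- the Nat fuel is only a totality guard (|er-sr|+|ec-sc| steps always suffice)
def pvBWalk (sr sc : Int) : Nat → Int → Int → List (Int × Int)
  | 0, _, _ => []
  | fuel + 1, r, c =>
    if r = sr ∧ c = sc then []
    else (r, c) :: pvBWalk sr sc fuel (r - pvStep sr r) (c - pvStep sc c)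

def generate_inbetween_squares_alt (start_row : Int) (start_col : Int) (end_row : Int) (end_col : Int) : List (Int × Int) :=
  if start_row = end_row ∧ start_col = end_col then []  -- raise ValueError (outside Pre_)
  else if end_row - start_row ≠ 0 ∧ end_col - start_col ≠ 0 ∧
          (end_row - start_row).natAbs ≠ (end_col - start_col).natAbs then []  -- raise ValueError (outside Pre_)
  else (pvBWalk start_row start_col ((end_row - start_row).natAbs + (end_col - start_col).natAbs) end_row end_col).reverse

-- ===== PRECONDITION & SPEC =====
-- Pre_ excludes exactly the inputs where the Python A raises ValueError:
-- identical start/end squares, and paths that are neither diagonal, horizontal nor vertical.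
def Pre_generate_inbetween_squares (start_row : Int) (start_col : Int) (end_row : Int) (end_col : Int) : Prop :=
  ¬(start_row = end_row ∧ start_col = end_col) ∧
  ((end_row - start_row).natAbs = (end_col - start_col).natAbs ∨ start_row = end_row ∨ start_col = end_col)
instance (start_row : Int) (start_col : Int) (end_row : Int) (end_col : Int) : Decidable (Pre_generate_inbetween_squares start_row start_col end_row end_col) := by unfold Pre_generate_inbetween_squares; infer_instance

def pvWitness_generate_inbetween_squares : Int × Int × Int × Int := (0, 0, 3, 3)

def Spec_generate_inbetween_squares (start_row : Int) (start_col : Int) (end_row : Int) (end_col : Int) (out : List (Int × Int)) : Prop := out = generate_inbetween_squares_alt start_row start_col end_row end_col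
instance (start_row : Int) (start_col : Int) (end_row : Int) (end_col : Int) (out : List (Int × Int)) : Decidable (Spec_generate_inbetween_squares start_row start_col end_row end_col out) := by unfold Spec_generate_inbetween_squares; infer_instance

-- ===== CLAIM (what is proved, stated in full; the proofs are below) =====
def Claim_equal_generate_inbetween_squares : Prop := ∀ (start_row : Int) (start_col : Int) (end_row : Int) (end_col : Int), Dom_generate_inbetween_squares start_row start_col end_row end_col → Pre_generate_inbetween_squares start_row start_col end_row end_col → Spec_generate_inbetween_squares start_row start_col end_row end_col (generate_inbetween_squares start_row start_col end_row end_col)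

-- ===== LEMMAS AND PROOFS =====

-- A's loop as a map over range
lemma pvALoop_eq (n : Nat) : ∀ (r c rd cd : Int),
    pvALoop n r c rd cd = (List.range n).map (fun (i : Nat) => (r + ((i : Int) + 1) * rd, c + ((i : Int) + 1) * cd)) := by
  induction n with
  | zero => intro r c rd cd; simp [pvALoop]
  | succ n ih =>
    intro r c rd cd
    rw [pvALoop, ih, List.range_succ_eq_map]
    simp only [List.map_cons, List.map_map]
    congr 1
    · simp only [Prod.mk.injEq]; push_cast; constructor <;> ring
    · apply List.map_congr_left
      intro i _
      simp only [Function.comp, Prod.mk.injEq]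
      push_cast
      constructor <;> ring

-- A's loop grows at the back when the count grows by one
lemma pvALoop_succ_back (n : Nat) (r c rd cd : Int) :
    pvALoop (n + 1) r c rd cd = pvALoop n r c rd cd ++ [(r + ((n : Int) + 1) * rd, c + ((n : Int) + 1) * cd)] := by
  rw [pvALoop_eq, pvALoop_eq, List.range_succ, List.map_append]
  simp

-- B's backward walk, started n unit steps (rd, cd) away from (sr, sc) with
-- enough fuel, is A's forward loop reversed.
lemma pvBWalk_spec (n : Nat) : ∀ (f : Nat) (sr sc rd cd r c : Int), n ≤ f →
    rd.natAbs ≤ 1 → cd.natAbs ≤ 1 → (rd ≠ 0 ∨ cd ≠ 0) →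
    r = sr + (n : Int) * rd → c = sc + (n : Int) * cd →
    pvBWalk sr sc f r c = (pvALoop n sr sc rd cd).reverse := by
  induction n with
  | zero =>
    intro f sr sc rd cd r c _ _ _ _ hr hc
    have hr' : r = sr := by omega
    have hc' : c = sc := by omega
    subst hr'; subst hc'
    cases f with
    | zero => simp [pvBWalk, pvALoop]
    | succ f => simp [pvBWalk, pvALoop]
  | succ n ih =>
    intro f sr sc rd cd r c hf hrd hcd hnz hr hc
    obtain ⟨f, rfl⟩ : ∃ f', f = f' + 1 := ⟨f - 1, by omega⟩
    have hrd3 : rd = -1 ∨ rd = 0 ∨ rd = 1 := by omega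
    have hcd3 : cd = -1 ∨ cd = 0 ∨ cd = 1 := by omega
    have hsr : pvStep sr r = rd := by
      simp only [pvStep]; rcases hrd3 with h | h | h <;> subst h <;> split_ifs <;> push_cast at hr <;> omega
    have hsc : pvStep sc c = cd := by
      simp only [pvStep]; rcases hcd3 with h | h | h <;> subst h <;> split_ifs <;> push_cast at hc <;> omega
    have hne : ¬(r = sr ∧ c = sc) := by
      rcases hnz with h | h
      · intro ⟨h1, _⟩; rcases hrd3 with h' | h' | h' <;> subst h' <;> push_cast at hr <;> omega
      · intro ⟨_, h2⟩; rcases hcd3 with h' | h' | h' <;> subst h' <;> push_cast at hc <;> omega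
    rw [pvBWalk, if_neg hne, pvALoop_succ_back, List.reverse_append,
        ih f sr sc rd cd (r - pvStep sr r) (c - pvStep sc c) (by omega) hrd hcd hnz
          (by rw [hsr, hr]; push_cast; ring) (by rw [hsc, hc]; push_cast; ring)]
    simp only [List.reverse_cons, List.reverse_nil, List.nil_append, List.singleton_append]
    rw [hr, hc]
    push_cast
    norm_num

-- ===== VERDICT (by name: the statement is the Claim_ definition above) =====
theorem generate_inbetween_squares_spec : Claim_equal_generate_inbetween_squares := by
  intro sr sc er ec _ hpre
  obtain ⟨hne, hstr⟩ := hpre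
  simp only [Spec_generate_inbetween_squares, generate_inbetween_squares,
    generate_inbetween_squares_alt]
  rw [if_neg hne, if_neg hne,
      if_neg (show ¬(er - sr ≠ 0 ∧ ec - sc ≠ 0 ∧ (er - sr).natAbs ≠ (ec - sc).natAbs) by
        rcases hstr with h | h | h <;> simp_all)]
  by_cases h1 : (er - sr).natAbs = (ec - sc).natAbs
  · -- diagonal: both deltas nonzero (else start = end)
    have hr : er - sr ≠ 0 := fun h0 => hne ⟨by omega, by omega⟩
    have hc : ec - sc ≠ 0 := by omega
    rw [if_pos h1]
    set rd : Int := if sr - er > 0 then -1 else 1 with hrd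
    set cd : Int := if sc - ec > 0 then -1 else 1 with hcd
    rw [pvBWalk_spec (er - sr).natAbs _ sr sc rd cd er ec (by omega)
        (by rw [hrd]; split_ifs <;> decide) (by rw [hcd]; split_ifs <;> decide)
        (by rw [hrd]; split_ifs <;> simp)
        (by rw [hrd]; split_ifs <;> omega) (by rw [hcd]; split_ifs <;> omega),
      List.reverse_reverse]
  · rw [if_neg h1]
    rcases hstr with h | h | h
    · exact absurd h h1
    · -- horizontal: sr = er
      have hc : ec - sc ≠ 0 := fun h0 => hne ⟨h, by omega⟩
      rw [if_pos h]
      set cd : Int := if sc - ec > 0 then -1 else 1 with hcd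
      rw [pvBWalk_spec (sc - ec).natAbs _ sr sc 0 cd er ec (by omega)
        (by decide) (by rw [hcd]; split_ifs <;> decide)
        (by rw [hcd]; split_ifs <;> simp)
        (by omega) (by rw [hcd]; split_ifs <;> omega),
      List.reverse_reverse]
    · -- vertical: sc = ec
      have hr : er - sr ≠ 0 := fun h0 => hne ⟨by omega, h⟩
      rw [if_neg (show ¬ sr = er by omega), if_pos h]
      set rd : Int := if sr - er > 0 then -1 else 1 with hrd
      rw [pvBWalk_spec (sr - er).natAbs _ sr sc rd 0 er ec (by omega)
        (by rw [hrd]; split_ifs <;> decide) (by decide)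
        (by rw [hrd]; split_ifs <;> simp)
        (by rw [hrd]; split_ifs <;> omega) (by omega),
      List.reverse_reverse]
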